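-- pv_equiv track=rewrite | github.com/SunnyKumar5/SpectraAI | src/spectra_ai/utils/formula_utils.py | dict_to_formula
-- ===== SOURCE A (Python) =====
-- def dict_to_formula(elements: dict[str, int]) -> str:
--     """
--     Convert element count dict to a Hill system formula string.
--
--     Hill system: C first, H second, then alphabetical.
--     """
--     if not elements:
--         return ""
--
--     parts = []
--     # C first
--     if "C" in elements:
--         parts.append(f"C{elements['C']}" if elements["C"] > 1 else "C")
--     # H second
--     if "H" in elements:
--         parts.append(f"H{elements['H']}" if elements["H"] > 1 else "H")
--     # Rest alphabetical
--     for elem in sorted(elements.keys()):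
--         if elem in ("C", "H"):
--             continue
--         count = elements[elem]
--         parts.append(f"{elem}{count}" if count > 1 else elem)
--
--     return "".join(parts)
-- ===== SOURCE B (Python) =====
-- def dict_to_formula(elements: dict[str, int]) -> str:
--     """Hill formula by selection: repeatedly pull the Hill-minimal remaining
--     element, remove it and append its formatted part (no sort, no staged passes)."""
--     remaining = list(elements)
--     out = ""
--     while remaining:
--         m = min(remaining, key=lambda e: "0" if e == "C" else "1" if e == "H" else "2" + e)
--         remaining.remove(m)
--         count = elements[m]
--         out += f"{m}{count}" if count > 1 else m
--     return out
-- ===== Notes on version B (the rewrite author's own statement) =====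
-- stated objective: alternative
-- what changed: B replaces A's three staged passes (emit C, emit H, then loop over sorted keys skipping C/H) by a selection loop: it repeatedly extracts the Hill-minimal remaining key with min, removes it, and appends its formatted part to a string accumulator — no sort call and no list of parts; trades O(n log n) for O(n^2) in exchange for one uniform loop.
import Mathlib
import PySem

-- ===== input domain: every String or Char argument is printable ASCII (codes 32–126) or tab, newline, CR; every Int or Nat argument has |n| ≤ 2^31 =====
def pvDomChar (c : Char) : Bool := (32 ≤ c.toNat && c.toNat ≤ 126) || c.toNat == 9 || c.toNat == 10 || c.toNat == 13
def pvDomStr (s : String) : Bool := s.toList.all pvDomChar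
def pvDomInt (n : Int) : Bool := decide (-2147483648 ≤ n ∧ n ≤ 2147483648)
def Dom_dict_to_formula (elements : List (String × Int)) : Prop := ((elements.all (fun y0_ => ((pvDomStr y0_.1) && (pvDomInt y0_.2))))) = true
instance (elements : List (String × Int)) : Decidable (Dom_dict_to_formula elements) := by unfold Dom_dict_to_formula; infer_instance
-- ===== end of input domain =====

-- B replaces A's three staged passes (C, H, sorted-loop-with-skip) by a selection loop:
-- repeatedly extract the Hill-minimal remaining key with min, remove it, and append its
-- formatted part to a string accumulator (objective: alternative).

-- ===== PORT A =====
def dict_to_formula (elements : List (String × Int)) : String :=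
  let d := PySem.Dict.mk elements
  if elements = [] then ""
  else
    let parts : List String := []
    let parts := if d.contains "C" then
        parts ++ [if d.getD "C" 0 > 1 then "C" ++ PySem.Int.toStr (d.getD "C" 0) else "C"]
      else parts
    let parts := if d.contains "H" then
        parts ++ [if d.getD "H" 0 > 1 then "H" ++ PySem.Int.toStr (d.getD "H" 0) else "H"]
      else parts
    let parts := (PySem.List.sorted d.keys (fun k => k) false).foldl
      (fun ps elem =>
        if elem = "C" ∨ elem = "H" then ps
        else ps ++ [if d.getD elem 0 > 1 then elem ++ PySem.Int.toStr (d.getD elem 0) else elem])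
      parts
    PySem.Str.join "" parts

-- ===== PORT B =====
-- the Hill comparison key of Source B's lambda
def pvRank (e : String) : String :=
  if e = "C" then "0" else if e = "H" then "1" else "2" ++ e

-- termination helper for pvGo, cited by name in decreasing_by
theorem pvRemove?_length_lt {l rest : List String} {m : String}
    (hm : PySem.List.min? l pvRank = some m)
    (hr : PySem.List.remove? l m = some rest) : rest.length < l.length := by
  have hmem : m ∈ l := PySem.List.min?_mem hm
  rw [PySem.List.remove?_eq_some_erase l m hmem, Option.some.injEq] at hr
  subst hr
  have h1 := List.length_erase_of_mem hmem
  have h2 : 0 < l.length := List.length_pos_of_mem hmem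
  omega

-- Source B's while loop: extract the Hill-minimal remaining key, remove it, append its part.
-- (the 'none' arms are the unreachable ValueError cases: min/remove on a list the loop
-- guarantees non-empty resp. containing m)
def pvGo (d : PySem.Dict String Int) (remaining : List String) (out : String) : String :=
  match hm : PySem.List.min? remaining pvRank with
  | none => out
  | some m =>
    match hr : PySem.List.remove? remaining m with
    | none => out
    | some rest =>
      pvGo d rest (out ++ (if d.getD m 0 > 1 then m ++ PySem.Int.toStr (d.getD m 0) else m))
termination_by remaining.length
decreasing_by exact pvRemove?_length_lt hm hr

def dict_to_formula_alt (elements : List (String × Int)) : String :=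
  let d := PySem.Dict.mk elements
  pvGo d d.keys ""

-- ===== PRECONDITION & SPEC =====
-- Pre_ excludes association lists with a repeated key: those represent no Python dict
-- (dict keys are unique), so A's behaviour is never defined on them.
def Pre_dict_to_formula (elements : List (String × Int)) : Prop :=
  (elements.map Prod.fst).Nodup
instance (elements : List (String × Int)) : Decidable (Pre_dict_to_formula elements) := by
  unfold Pre_dict_to_formula; infer_instance
def pvWitness_dict_to_formula : (List (String × Int)) := [("C", 2), ("H", 6), ("O", 1)]
def Spec_dict_to_formula (elements : List (String × Int)) (out : String) : Prop := out = dict_to_formula_alt elements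
instance (elements : List (String × Int)) (out : String) : Decidable (Spec_dict_to_formula elements out) := by unfold Spec_dict_to_formula; infer_instance

-- ===== CLAIM (what is proved, stated in full; the proofs are below) =====
def Claim_equal_dict_to_formula : Prop := ∀ (elements : List (String × Int)), Dom_dict_to_formula elements → Pre_dict_to_formula elements → Spec_dict_to_formula elements (dict_to_formula elements)

-- ===== LEMMAS AND PROOFS =====

-- the common formatting step f'{elem}{count}' if count > 1 else elem
def pvFmt (d : PySem.Dict String Int) (e : String) : String :=
  if d.getD e 0 > 1 then e ++ PySem.Int.toStr (d.getD e 0) else e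

theorem pvJoin_cons (x : String) (xs : List String) :
    PySem.Str.join "" (x :: xs) = x ++ PySem.Str.join "" xs := by
  simp only [PySem.Str.join, String.toList_empty, List.map_cons]
  cases xs with
  | nil => simp [PySem.Chars.join_singleton, PySem.Chars.join_nil]
  | cons y ys => simp only [List.map_cons, PySem.Chars.join_cons_cons]; simp

-- A's loop 'skip C/H, else append the formatted part' is append-of-map-of-filter.
theorem pvFoldl_skipCH (g : String → String) (l acc : List String) :
    l.foldl (fun ps e => if e = "C" ∨ e = "H" then ps else ps ++ [g e]) acc
      = acc ++ (l.filter (fun e => !(e == "C" || e == "H"))).map g := by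
  induction l generalizing acc with
  | nil => simp
  | cons a l ih =>
    by_cases h : a = "C" ∨ a = "H"
    · rw [List.foldl_cons, if_pos h, ih,
        List.filter_cons_of_neg (by rcases h with h | h <;> simp [h])]
    · rw [List.foldl_cons, if_neg h, ih,
        List.filter_cons_of_pos (by push_neg at h; simp [h.1, h.2])]
      simp

-- pulling one element of a duplicate-free list to the front is a permutation
theorem pvPull_one (l : List String) (a : String) (hnd : l.Nodup) :
    ((if a ∈ l then [a] else []) ++ l.filter (fun e => !(e == a))).Perm l := by
  by_cases h : a ∈ l
  · rw [if_pos h]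
    have he : l.filter (fun e => !(e == a)) = l.erase a := by
      rw [List.Nodup.erase_eq_filter hnd a]
      rfl
    rw [he, List.singleton_append]
    exact (List.perm_cons_erase h).symm
  · rw [if_neg h, List.nil_append,
      List.filter_eq_self.mpr (fun b hb => by
        simp only [Bool.not_eq_true', beq_eq_false_iff_ne, ne_eq]
        rintro rfl; exact h hb)]
theorem pvPull_perm (l : List String) (hnd : l.Nodup) :
    ((if "C" ∈ l then ["C"] else []) ++ (if "H" ∈ l then ["H"] else [])
      ++ l.filter (fun e => !(e == "C" || e == "H"))).Perm l := by
  have hsplit : l.filter (fun e => !(e == "C" || e == "H"))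
      = (l.filter (fun e => !(e == "C"))).filter (fun e => !(e == "H")) := by
    rw [List.filter_filter]
    apply List.filter_congr
    intro b _
    cases hb : (b == "C") <;> cases hb' : (b == "H") <;> simp [hb, hb']
  have hmemH : (("H" : String) ∈ l.filter (fun e => !(e == "C"))) ↔ ("H" : String) ∈ l := by
    simp [List.mem_filter]
  have hinner := pvPull_one (l.filter (fun e => !(e == "C"))) "H" (hnd.filter _)
  simp only [← hmemH]
  rw [hsplit, List.append_assoc]
  exact (List.Perm.append_left _ hinner).trans (pvPull_one l "C" hnd)

theorem pvKey_lt {a b : String} (ha : ¬a = "C" ∧ ¬a = "H") (hb : ¬b = "C" ∧ ¬b = "H")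
    (h : a < b) : pvRank a < pvRank b := by
  unfold pvRank
  rw [if_neg ha.1, if_neg ha.2, if_neg hb.1, if_neg hb.2]
  rw [String.lt_iff_toList_lt] at *
  simp only [String.toList_append]
  show ('2' :: a.toList) < ('2' :: b.toList)
  simpa using h

theorem pvKey_lo_lt {b : String} (hb : ¬b = "C" ∧ ¬b = "H") (lo : String)
    (hlo : lo = "0" ∨ lo = "1") : lo < pvRank b := by
  unfold pvRank
  rw [if_neg hb.1, if_neg hb.2, String.lt_iff_toList_lt]
  simp only [String.toList_append]
  rcases hlo with h | h <;> subst h <;> exact List.Lex.rel (by decide)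

theorem pvKeyC : pvRank "C" = "0" := by unfold pvRank; simp
theorem pvKeyH : pvRank "H" = "1" := by unfold pvRank; simp

theorem pvRank_inj {a b : String} (h : pvRank a = pvRank b) : a = b := by
  unfold pvRank at h
  by_cases ha : a = "C" <;> by_cases ha' : a = "H" <;>
    by_cases hb : b = "C" <;> by_cases hb' : b = "H" <;>
      simp only [ha, ha', hb, hb', if_true, if_false] at h ⊢ <;>
        first
        | rfl
        | simpa [String.toList_inj] using congrArg String.toList h

-- B's single sort-free selection order IS A's C-then-H-then-alphabetical order:
-- the Hill-sorted list decomposes as A's three blocks …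
theorem pvSorted_hill (ks : List String) (hnd : ks.Nodup) :
    PySem.List.sorted ks pvRank false
      = (if "C" ∈ ks then ["C"] else []) ++ (if "H" ∈ ks then ["H"] else [])
        ++ (PySem.List.sorted ks (fun k => k) false).filter (fun e => !(e == "C" || e == "H")) := by
  have hs : (PySem.List.sorted ks (fun k => k) false).Perm ks :=
    PySem.List.sorted_perm ks (fun k => k) false
  have hsn : (PySem.List.sorted ks (fun k => k) false).Nodup := hs.nodup_iff.mpr hnd
  apply PySem.List.sorted_eq_of_perm_of_pairwise_lt
  · -- permutation
    have := pvPull_perm (PySem.List.sorted ks (fun k => k) false) hsn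
    simp only [PySem.List.mem_sorted] at this
    exact this.trans hs
  · -- strictly increasing in the Hill key
    have hfilter : List.Pairwise (fun a b => pvRank a < pvRank b)
        ((PySem.List.sorted ks (fun k => k) false).filter
          (fun e => !(e == "C" || e == "H"))) := by
      have hlt : List.Pairwise (fun a b : String => a < b)
          (PySem.List.sorted ks (fun k => k) false) :=
        ((PySem.List.sorted_pairwise ks (fun k => k)).and hsn).imp
          (fun h => lt_of_le_of_ne h.1 h.2)
      refine (hlt.filter _).imp_of_mem ?_
      intro a b hamem hbmem hab
      have ha := (List.mem_filter.mp hamem).2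
      have hb := (List.mem_filter.mp hbmem).2
      simp only [Bool.not_eq_eq_eq_not, Bool.not_true, Bool.or_eq_false_iff,
        beq_eq_false_iff_ne, ne_eq] at ha hb
      exact pvKey_lt ha hb hab
    rw [List.pairwise_append, List.pairwise_append]
    refine ⟨⟨by split <;> simp, by split <;> simp, ?_⟩, hfilter, ?_⟩
    · intro a hamem b hbmem
      have ha : a = "C" := by revert hamem; split <;> simp_all
      have hb : b = "H" := by revert hbmem; split <;> simp_all
      subst ha; subst hb
      rw [pvKeyC, pvKeyH, String.lt_iff_toList_lt]; decide
    · intro a hamem b hbmem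
      have hb := (List.mem_filter.mp hbmem).2
      simp only [Bool.not_eq_eq_eq_not, Bool.not_true, Bool.or_eq_false_iff,
        beq_eq_false_iff_ne, ne_eq] at hb
      rw [List.mem_append] at hamem
      rcases hamem with ha | ha
      · have ha' : a = "C" := by revert ha; split <;> simp_all
        subst ha'; rw [pvKeyC]; exact pvKey_lo_lt hb _ (Or.inl rfl)
      · have ha' : a = "H" := by revert ha; split <;> simp_all
        subst ha'; rw [pvKeyH]; exact pvKey_lo_lt hb _ (Or.inr rfl)

-- … and B's repeated min-extraction produces exactly the Hill-sorted list, one head at a time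
theorem pvMin_head_sorted {l : List String} {m : String} (hnd : l.Nodup)
    (hm : PySem.List.min? l pvRank = some m) :
    PySem.List.sorted l pvRank false = m :: PySem.List.sorted (l.erase m) pvRank false := by
  have hmem : m ∈ l := PySem.List.min?_mem hm
  have hmin : ∀ y ∈ l, pvRank m ≤ pvRank y := PySem.List.min?_isMin hm
  have hse : (PySem.List.sorted (l.erase m) pvRank false).Perm (l.erase m) :=
    PySem.List.sorted_perm _ _ _
  have hnde : (l.erase m).Nodup := hnd.erase m
  apply PySem.List.sorted_eq_of_perm_of_pairwise_lt
  · exact ((hse.cons m).trans (List.perm_cons_erase hmem).symm)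
  · refine List.pairwise_cons.mpr ⟨?_, ?_⟩
    · intro y hy
      have hyl : y ∈ l.erase m := hse.mem_iff.mp hy
      have hyne : y ≠ m := by
        intro h; subst h; exact (List.Nodup.not_mem_erase hnd) hyl
      exact lt_of_le_of_ne (hmin y (List.mem_of_mem_erase hyl))
        (fun h => hyne (pvRank_inj h.symm))
    · have hle := PySem.List.sorted_pairwise (l.erase m) pvRank
      have hsn : (PySem.List.sorted (l.erase m) pvRank false).Nodup :=
        hse.nodup_iff.mpr hnde
      exact (hle.and hsn).imp (fun h =>
        lt_of_le_of_ne h.1 (fun he => h.2 (pvRank_inj he)))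

-- B's selection loop computes the concatenation of the formatted parts in Hill order
theorem pvGo_eq (d : PySem.Dict String Int) (l : List String) (out : String) (hnd : l.Nodup) :
    pvGo d l out = out ++ PySem.Str.join "" ((PySem.List.sorted l pvRank false).map (pvFmt d)) := by
  induction hlen : l.length using Nat.strong_induction_on generalizing l out with
  | _ n ih =>
  rw [pvGo]
  split
  · next hm =>
    have hl : l = [] := (PySem.List.min?_eq_none_iff l pvRank).mp hm
    subst hl
    have hs : PySem.List.sorted ([] : List String) pvRank false = [] :=
      List.Perm.eq_nil (PySem.List.sorted_perm _ _ _)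
    rw [hs]
    simp [PySem.Str.join, PySem.Chars.join_nil]
  · next m hm =>
    have hmem : m ∈ l := PySem.List.min?_mem hm
    split
    · next hr =>
      rw [PySem.List.remove?_eq_some_erase l m hmem] at hr
      exact absurd hr (by simp)
    · next rest hr =>
      rw [PySem.List.remove?_eq_some_erase l m hmem, Option.some.injEq] at hr
      subst hr
      have he1 := List.length_erase_of_mem hmem
      have he2 : 0 < l.length := List.length_pos_of_mem hmem
      rw [pvMin_head_sorted hnd hm, List.map_cons, pvJoin_cons,
        ih (l.erase m).length (by omega) (l.erase m) _ (hnd.erase m) rfl,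
        String.append_assoc]
      rfl

-- ===== VERDICT (by name: the statement is the Claim_ definition above) =====
set_option maxRecDepth 10000 in
theorem dict_to_formula_spec : Claim_equal_dict_to_formula := by
  intro elements _ hpre
  unfold Spec_dict_to_formula dict_to_formula dict_to_formula_alt
  have hnd : ((PySem.Dict.mk elements).keys).Nodup := by
    simpa [PySem.Dict.keys] using hpre
  rw [pvGo_eq _ _ _ hnd, String.empty_append]
  by_cases he : elements = []
  · subst he; rfl
  · rw [if_neg he]
    simp only [pvFoldl_skipCH, PySem.List.foldl_append_singleton_eq_map, List.nil_append,
      pvSorted_hill _ hnd, List.map_append, pvFmt]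
    by_cases hc : ("C" : String) ∈ (PySem.Dict.mk elements).keys <;>
      by_cases hh : ("H" : String) ∈ (PySem.Dict.mk elements).keys
    · have haC : (PySem.Dict.mk elements).contains "C" = true :=
        (PySem.Dict.contains_iff_mem_keys _ _).mpr hc
      have haH : (PySem.Dict.mk elements).contains "H" = true :=
        (PySem.Dict.contains_iff_mem_keys _ _).mpr hh
      rw [if_pos haH, if_pos haC, if_pos hc, if_pos hh]
      unfold pvFmt
      simp [List.append_assoc]
    · have haC : (PySem.Dict.mk elements).contains "C" = true :=
        (PySem.Dict.contains_iff_mem_keys _ _).mpr hc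
      have haH : ¬ (PySem.Dict.mk elements).contains "H" = true :=
        fun h => hh ((PySem.Dict.contains_iff_mem_keys _ _).mp h)
      rw [if_neg haH, if_pos haC, if_pos hc, if_neg hh]
      unfold pvFmt
      simp [List.append_assoc]
    · have haC : ¬ (PySem.Dict.mk elements).contains "C" = true :=
        fun h => hc ((PySem.Dict.contains_iff_mem_keys _ _).mp h)
      have haH : (PySem.Dict.mk elements).contains "H" = true :=
        (PySem.Dict.contains_iff_mem_keys _ _).mpr hh
      rw [if_pos haH, if_neg haC, if_neg hc, if_pos hh]
      unfold pvFmt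
      simp [List.append_assoc]
    · have haC : ¬ (PySem.Dict.mk elements).contains "C" = true :=
        fun h => hc ((PySem.Dict.contains_iff_mem_keys _ _).mp h)
      have haH : ¬ (PySem.Dict.mk elements).contains "H" = true :=
        fun h => hh ((PySem.Dict.contains_iff_mem_keys _ _).mp h)
      rw [if_neg haH, if_neg haC, if_neg hc, if_neg hh]
      unfold pvFmt
      simp [List.append_assoc]
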